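-- pv_equiv track=rewrite | github.com/cpaztrillo/utec_isoftware1_2022_2 | CalculaGanador.py | calcularvotos
-- ===== SOURCE A (Python) =====
-- def calcularvotos(data, client):
--     votosxcandidato = {}
--     for fila in data:
--         nombrecandidato = fila[4]
--         if not nombrecandidato in votosxcandidato:
--             votosxcandidato[nombrecandidato] = 0
--         if fila[5] == '1' and len(fila[3]) == 8:
--             votosxcandidato[nombrecandidato] = votosxcandidato[nombrecandidato] + 1
--     return votosxcandidato
-- ===== SOURCE B (Python) =====
-- def calcularvotos(data, client):
--     # Collect candidate names in first-appearance order (no dict at all).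
--     candidatos = []
--     for fila in data:
--         if fila[4] not in candidatos:
--             candidatos.append(fila[4])
--     # Per candidate, count its valid votes with a dedicated scan over the rows.
--     return {c: sum(1 for fila in data
--                    if fila[4] == c and fila[5] == '1' and len(fila[3]) == 8)
--             for c in candidatos}
-- ===== Notes on version B (the rewrite author's own statement) =====
-- stated objective: alternative
-- what changed: B drops A's incrementally-updated counting dict entirely: it builds the ordered list of distinct candidate names, then computes each candidate's tally by its own dedicated scan over the rows (per-key counting, O(n*k) nested scans) instead of A's single hash-counting pass.
import Mathlib
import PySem

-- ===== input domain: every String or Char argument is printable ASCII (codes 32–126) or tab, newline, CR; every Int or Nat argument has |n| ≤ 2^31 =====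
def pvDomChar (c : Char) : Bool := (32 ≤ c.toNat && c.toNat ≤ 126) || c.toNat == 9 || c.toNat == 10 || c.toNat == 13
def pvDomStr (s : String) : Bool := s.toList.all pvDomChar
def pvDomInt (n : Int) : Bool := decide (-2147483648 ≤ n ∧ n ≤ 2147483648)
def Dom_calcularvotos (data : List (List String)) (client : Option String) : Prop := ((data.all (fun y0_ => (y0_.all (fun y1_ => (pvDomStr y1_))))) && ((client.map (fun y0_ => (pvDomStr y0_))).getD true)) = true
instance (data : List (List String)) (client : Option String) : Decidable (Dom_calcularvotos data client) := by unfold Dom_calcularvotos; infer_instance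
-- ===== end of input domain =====

-- B replaces A's single incrementally-updated counting dict with per-key counting: an ordered distinct-keys list, then one dedicated counting scan per candidate; same values, same order.


-- ===== PORT A =====
-- single pass: per row, register the candidate if new, then increment on a valid vote
def calcularvotos (data : List (List String)) (client : Option String) : List (String × Int) :=
  (data.foldl (fun d fila =>
      let nombre := (PySem.List.pyGet? fila 4).getD ""
      let d := if d.contains nombre then d else d.insert nombre 0
      if ((PySem.List.pyGet? fila 5).getD "" == "1")
          && (PySem.Str.len ((PySem.List.pyGet? fila 3).getD "") == 8)
      then d.insert nombre (d.getD nombre 0 + 1)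
      else d)
    PySem.Dict.empty).items

-- ===== PORT B =====
-- pass 1: first-appearance list of candidate names; then one counting scan per candidate
def calcularvotos_alt (data : List (List String)) (client : Option String) : List (String × Int) :=
  let candidatos := data.foldl (fun ks fila =>
      let k := (PySem.List.pyGet? fila 4).getD ""
      if ks.contains k then ks else ks ++ [k]) []
  candidatos.map (fun c =>
    (c, data.foldl (fun acc fila =>
        if ((PySem.List.pyGet? fila 4).getD "" == c)
            && ((PySem.List.pyGet? fila 5).getD "" == "1")
            && (PySem.Str.len ((PySem.List.pyGet? fila 3).getD "") == 8)
        then acc + 1 else acc) (0 : Int)))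

-- ===== PRECONDITION & SPEC =====
-- Pre_: every row has at least 6 fields; otherwise A raises IndexError on fila[4] or fila[5].
def Pre_calcularvotos (data : List (List String)) (client : Option String) : Prop :=
  ∀ fila ∈ data, 6 ≤ fila.length
instance (data : List (List String)) (client : Option String) : Decidable (Pre_calcularvotos data client) := by unfold Pre_calcularvotos; infer_instance
def pvWitness_calcularvotos : List (List String) × Option String :=
  ([["a", "b", "c", "12345678", "X", "1"], ["a", "b", "c", "1234", "Y", "1"]], none)

def Spec_calcularvotos (data : List (List String)) (client : Option String) (out : List (String × Int)) : Prop := out = calcularvotos_alt data client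
instance (data : List (List String)) (client : Option String) (out : List (String × Int)) : Decidable (Spec_calcularvotos data client out) := by unfold Spec_calcularvotos; infer_instance

-- ===== CLAIM (what is proved, stated in full; the proofs are below) =====
def Claim_equal_calcularvotos : Prop := ∀ (data : List (List String)) (client : Option String), Dom_calcularvotos data client → Pre_calcularvotos data client → Spec_calcularvotos data client (calcularvotos data client)

-- ===== LEMMAS AND PROOFS =====

-- proof-only canonical helpers
def pvKey (fila : List String) : String := (PySem.List.pyGet? fila 4).getD ""
def pvValid (fila : List String) : Bool :=
  ((PySem.List.pyGet? fila 5).getD "" == "1")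
    && (PySem.Str.len ((PySem.List.pyGet? fila 3).getD "") == 8)

def pvStepA (d : PySem.Dict String Int) (fila : List String) : PySem.Dict String Int :=
  let d := if d.contains (pvKey fila) then d else d.insert (pvKey fila) 0
  if pvValid fila then d.insert (pvKey fila) (d.getD (pvKey fila) 0 + 1) else d

theorem calcA_eq (data : List (List String)) (client : Option String) :
    calcularvotos data client = (data.foldl pvStepA PySem.Dict.empty).items := rfl

theorem keys_stepA (d : PySem.Dict String Int) (fila : List String) :
    (pvStepA d fila).keys = PySem.Set.add d.keys (pvKey fila) := by
  unfold pvStepA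
  by_cases h : d.contains (pvKey fila) = true
  · simp only [h, if_true]
    rw [PySem.Set.add_of_mem (by rwa [← PySem.Dict.contains_iff_mem_keys])]
    split
    · rw [PySem.Dict.keys_insert_of_contains _ _ h]
    · rfl
  · simp only [h, if_false, Bool.false_eq_true]
    have h' := PySem.Dict.keys_insert_of_not_contains (d := d) (k := pvKey fila) (v := 0)
        (by simpa using h)
    rw [PySem.Set.add_of_not_mem (by rw [← PySem.Dict.contains_iff_mem_keys]; simpa using h)]
    split
    · rw [PySem.Dict.keys_insert_of_contains _ _ (by simp [PySem.Dict.contains_insert]), h']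
    · exact h'

theorem keys_foldA (data : List (List String)) (d : PySem.Dict String Int) :
    (data.foldl pvStepA d).keys = PySem.Set.update d.keys (data.map pvKey) := by
  induction data generalizing d with
  | nil => rfl
  | cons fila rest ih =>
      simp only [List.foldl_cons, List.map_cons, PySem.Set.update_cons, ih, keys_stepA]

theorem nodup_stepA (d : PySem.Dict String Int) (fila : List String) (h : d.keys.Nodup) :
    (pvStepA d fila).keys.Nodup := by
  rw [keys_stepA]; exact PySem.Set.nodup_add _ _ h

theorem nodup_foldA (data : List (List String)) (d : PySem.Dict String Int) (h : d.keys.Nodup) :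
    (data.foldl pvStepA d).keys.Nodup := by
  induction data generalizing d with
  | nil => exact h
  | cons fila rest ih => exact ih _ (nodup_stepA _ _ h)

theorem getD_stepA (d : PySem.Dict String Int) (fila : List String) (k : String) :
    (pvStepA d fila).getD k 0 =
      d.getD k 0 + (if pvValid fila ∧ pvKey fila = k then 1 else 0) := by
  unfold pvStepA
  have base : (if d.contains (pvKey fila) then d else d.insert (pvKey fila) 0).getD k 0
      = d.getD k 0 := by
    split
    · rfl
    · rename_i hc
      rw [PySem.Dict.getD_insert]
      split
      · rename_i hk
        subst hk
        rw [PySem.Dict.getD_of_not_contains _ _ (by simpa using hc)]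
      · rfl
  by_cases hv : pvValid fila = true
  · simp only [hv, if_true, true_and]
    rw [PySem.Dict.getD_insert]
    split
    · rename_i hk; subst hk; rw [base]; simp
    · rename_i hk; rw [base]; simp [Ne.symm hk]
  · simp only [hv, Bool.false_eq_true, if_false, base]
    simp [hv]

theorem getD_foldA (data : List (List String)) (d : PySem.Dict String Int) (k : String) :
    (data.foldl pvStepA d).getD k 0 =
      d.getD k 0 + (((data.filter pvValid).map pvKey).count k : Int) := by
  induction data generalizing d with
  | nil => simp
  | cons fila rest ih =>
      simp only [List.foldl_cons, ih, getD_stepA]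
      have hcount : ((((fila :: rest).filter pvValid).map pvKey).count k : Int)
          = (if pvValid fila ∧ pvKey fila = k then 1 else 0)
            + (((rest.filter pvValid).map pvKey).count k : Int) := by
        by_cases hv : pvValid fila = true
        · simp only [List.filter_cons, hv, if_true, List.map_cons, List.count_cons, true_and]
          by_cases hk : pvKey fila = k
          · simp only [hk, if_true, beq_self_eq_true]
            push_cast
            ring
          · simp only [hk, if_false, beq_iff_eq, add_zero, Nat.cast_inj]
            ring
        · simp [List.filter_cons, hv]
      rw [hcount]
      ring

-- B's candidate list is set(map(key, data)) in first-appearance order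
theorem keysB_eq (data : List (List String)) :
    data.foldl (fun ks fila =>
        let k := (PySem.List.pyGet? fila 4).getD ""
        if ks.contains k then ks else ks ++ [k]) [] =
      PySem.Set.ofList (data.map pvKey) := by
  rw [PySem.Set.ofList_eq_foldl, List.foldl_map]
  rfl

-- B's per-candidate scan counts k among the keys of the valid rows
theorem countB_eq (data : List (List String)) (k : String) (acc : Int) :
    data.foldl (fun acc fila =>
        if ((PySem.List.pyGet? fila 4).getD "" == k)
            && ((PySem.List.pyGet? fila 5).getD "" == "1")
            && (PySem.Str.len ((PySem.List.pyGet? fila 3).getD "") == 8)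
        then acc + 1 else acc) acc =
      acc + (((data.filter pvValid).map pvKey).count k : Int) := by
  induction data generalizing acc with
  | nil => simp
  | cons fila rest ih =>
      simp only [List.foldl_cons, ih]
      by_cases hv : pvValid fila = true
      · have hv' := hv
        unfold pvValid at hv'
        by_cases hk : pvKey fila = k
        · have hk' : ((PySem.List.pyGet? fila 4).getD "" == k) = true := by
            simpa [pvKey] using hk
          simp only [List.filter_cons, hv, if_true, List.map_cons, List.count_cons, hk', hv',
            Bool.and_true, Bool.true_and, if_true, hk, beq_self_eq_true]
          push_cast
          ring
        · have hk' : ((PySem.List.pyGet? fila 4).getD "" == k) = false := by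
            simpa [pvKey] using hk
          simp [List.filter_cons, hv, List.count_cons, hk', hk]
      · have hv' : (((PySem.List.pyGet? fila 5).getD "" == "1")
            && (PySem.Str.len ((PySem.List.pyGet? fila 3).getD "") == 8)) = false := by
          simpa [pvValid] using hv
        have hcond : (((PySem.List.pyGet? fila 4).getD "" == k)
            && (((PySem.List.pyGet? fila 5).getD "" == "1")
            && (PySem.Str.len ((PySem.List.pyGet? fila 3).getD "") == 8))) = false := by
          rw [hv', Bool.and_false]
        rw [Bool.and_assoc, hcond]
        simp [List.filter_cons, hv]

theorem calcB_eq (data : List (List String)) (client : Option String) :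
    calcularvotos_alt data client =
      (PySem.Set.ofList (data.map pvKey)).map
        (fun k => (k, (((data.filter pvValid).map pvKey).count k : Int))) := by
  unfold calcularvotos_alt
  rw [keysB_eq]
  refine List.map_congr_left (fun k _ => ?_)
  rw [countB_eq]
  simp

-- final assembly
theorem main_eq (data : List (List String)) (client : Option String) :
    calcularvotos data client = calcularvotos_alt data client := by
  rw [calcA_eq, calcB_eq]
  have hkeysA : (data.foldl pvStepA PySem.Dict.empty).keys
      = PySem.Set.ofList (data.map pvKey) := by
    rw [keys_foldA]
    simp [PySem.Dict.keys_empty, PySem.Set.update_nil_left]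
  have hndA : (data.foldl pvStepA PySem.Dict.empty).keys.Nodup :=
    nodup_foldA _ _ (by simp [PySem.Dict.keys_empty])
  rw [PySem.Dict.items_eq_map_keys _ hndA (0 : Int), hkeysA]
  refine List.map_congr_left (fun k _ => ?_)
  rw [getD_foldA, PySem.Dict.getD_empty]
  simp

-- ===== VERDICT (by name: the statement is the Claim_ definition above) =====
theorem calcularvotos_spec : Claim_equal_calcularvotos := by
  intro data client _ _
  unfold Spec_calcularvotos
  exact main_eq data client
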